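-- pv_equiv track=rewrite | github.com/Radcliffe/OEIS-Python | src/oeispy/A370/A370255.py | A370255
-- ===== SOURCE A (Python) =====
-- def A370255(n):
--     if n == 0: return 1
--     m = n
--     a, b = divmod(m,10)
--     while not b:
--         m = a
--         a, b = divmod(m,10)
--     return m**(10*n) # _Chai Wah Wu_, Feb 20 2024
-- ===== SOURCE B (Python) =====
-- def A370255(n):
--     if n == 0: return 1
--     s = str(n)
--     z = len(s) - len(s.rstrip('0'))
--     return (n // 10**z) ** (10*n)
-- ===== Notes on version B (the rewrite author's own statement) =====
-- stated objective: simpler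
-- what changed: B counts the trailing zeros as a length difference on the decimal string (len(s) - len(s.rstrip('0'))) and removes them with a single division by 10**z, instead of A's iterative divmod digit-peeling loop; the dominant power stays the same.
-- outside the precondition, e.g. on A370255(-10): A returns 1.0, B returns 1.0; on A370255(-3): A returns 4.8569357496188614e-15, B returns 4.8569357496188614e-15
import Mathlib
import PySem

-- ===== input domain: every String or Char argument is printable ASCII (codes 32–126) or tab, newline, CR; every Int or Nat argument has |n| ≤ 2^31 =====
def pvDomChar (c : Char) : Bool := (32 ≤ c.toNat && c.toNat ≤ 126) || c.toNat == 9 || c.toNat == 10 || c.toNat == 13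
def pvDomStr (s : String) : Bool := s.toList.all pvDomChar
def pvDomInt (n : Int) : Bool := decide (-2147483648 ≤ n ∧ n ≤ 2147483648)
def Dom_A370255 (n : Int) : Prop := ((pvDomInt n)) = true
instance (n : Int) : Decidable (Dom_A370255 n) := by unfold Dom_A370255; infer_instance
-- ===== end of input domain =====

-- B replaces A's divmod digit-peeling loop by a string-based trailing-zero count and one division;
-- equivalence is claimed on 0 ≤ n (for n < 0 the Python returns a float, not an int).

-- ===== PORT A =====
-- A's 'while not b:' loop; the divmod(m,10) pair is (floordiv, mod). The fuel argument only
-- makes the recursion total: it is never exhausted on the inputs reached (the loop shrinks |m|;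
-- m = 0, the only non-terminating start, is unreachable behind the n == 0 guard).
def pvLoopA : Nat → Int → Int
  | 0, m => m
  | fuel+1, m =>
      let a := PySem.Int.floordiv m 10
      let b := PySem.Int.mod m 10
      if b = 0 then pvLoopA fuel a else m

-- 'm**(10*n)': an int only for n ≥ 0 (Pre_); '(10*n).toNat' is exact there.
def A370255 (n : Int) : Int :=
  if n = 0 then 1
  else (pvLoopA (n.natAbs + 1) n) ^ (10 * n).toNat

-- ===== PORT B =====
-- hand port of s.rstrip('0') (no PySem primitive for one-sided rstrip with chars):
-- exact — removes precisely the maximal trailing run of '0' characters.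
def pvRstripZeros (cs : List Char) : List Char :=
  (cs.reverse.dropWhile (fun c => c == '0')).reverse

def A370255_alt (n : Int) : Int :=
  if n = 0 then 1
  else
    let s := PySem.Int.toChars n
    let z : Nat := s.length - (pvRstripZeros s).length
    (PySem.Int.floordiv n (10 ^ z)) ^ (10 * n).toNat

-- ===== PRECONDITION & SPEC =====
-- Pre_ excludes n < 0, where A's m**(10*n) returns a float, not a value of the declared int type.
def Pre_A370255 (n : Int) : Prop := 0 ≤ n
instance (n : Int) : Decidable (Pre_A370255 n) := by unfold Pre_A370255; infer_instance
def pvWitness_A370255 : Int := (20)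

def Spec_A370255 (n : Int) (out : Int) : Prop := out = A370255_alt n
instance (n : Int) (out : Int) : Decidable (Spec_A370255 n out) := by unfold Spec_A370255; infer_instance

-- ===== CLAIM (what is proved, stated in full; the proofs are below) =====
def Claim_equal_A370255 : Prop := ∀ (n : Int), Dom_A370255 n → Pre_A370255 n → Spec_A370255 n (A370255 n)

-- ===== LEMMAS AND PROOFS =====

-- A's loop as a function of the Nat value: strip trailing zeros.
def stripNat (m : Nat) : Nat :=
  if h : m % 10 = 0 ∧ 0 < m then stripNat (m / 10) else m
termination_by m
decreasing_by exact Nat.div_lt_self h.2 (by norm_num)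

lemma stripNat_spec : ∀ m : Nat, 0 < m →
    ∃ k : Nat, m = stripNat m * 10 ^ k ∧ stripNat m % 10 ≠ 0 ∧ 0 < stripNat m := by
  intro m
  induction m using Nat.strong_induction_on with
  | _ m ih =>
    intro hm
    by_cases h10 : m % 10 = 0
    · have hdiv : m / 10 < m := Nat.div_lt_self hm (by norm_num)
      have hpos : 0 < m / 10 := by omega
      obtain ⟨k, hk, hne, hp⟩ := ih (m / 10) hdiv hpos
      have hs : stripNat m = stripNat (m / 10) := by
        rw [stripNat]; simp [h10, hm]
      refine ⟨k + 1, ?_, by rw [hs]; exact hne, by rw [hs]; exact hp⟩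
      rw [hs, pow_succ, ← Nat.mul_assoc, ← hk]
      omega
    · have hs : stripNat m = m := by rw [stripNat]; simp [h10]
      exact ⟨0, by rw [hs]; ring, by rw [hs]; exact h10, by rw [hs]; exact hm⟩

lemma loopA_eq : ∀ m : Nat, ∀ fuel : Nat, 0 < m → m < fuel →
    pvLoopA fuel (m : Int) = ((stripNat m : Nat) : Int) := by
  intro m
  induction m using Nat.strong_induction_on with
  | _ m ih =>
    intro fuel hm hf
    obtain ⟨f, rfl⟩ : ∃ f, fuel = f + 1 := ⟨fuel - 1, by omega⟩
    have hmod : PySem.Int.mod (m : Int) 10 = ((m % 10 : Nat) : Int) := by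
      exact_mod_cast PySem.Int.mod_natCast m 10
    have hfd : PySem.Int.floordiv (m : Int) 10 = ((m / 10 : Nat) : Int) := by
      exact_mod_cast PySem.Int.floordiv_natCast m 10
    simp only [pvLoopA, hmod, hfd, Nat.cast_eq_zero]
    by_cases h10 : m % 10 = 0
    · have hdiv : m / 10 < m := Nat.div_lt_self hm (by norm_num)
      have hpos : 0 < m / 10 := by omega
      have hs : stripNat m = stripNat (m / 10) := by
        rw [stripNat]; simp [h10, hm]
      rw [if_pos h10, ih (m / 10) hdiv f hpos (by omega), hs]
    · rw [if_neg h10, stripNat]; simp [h10, hm]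

lemma dropWhile_replicate_zero (k : Nat) (ys : List Char) :
    (List.replicate k '0' ++ ys).dropWhile (fun c => c == '0') =
      ys.dropWhile (fun c => c == '0') := by
  induction k with
  | zero => simp
  | succ k ihk => simp [List.replicate_succ, ihk]

lemma rstrip_append_replicate (xs : List Char) (k : Nat) :
    pvRstripZeros (xs ++ List.replicate k '0') = pvRstripZeros xs := by
  unfold pvRstripZeros
  rw [List.reverse_append, List.reverse_replicate, dropWhile_replicate_zero]

lemma rstrip_last_ne (xs : List Char) (c : Char) (hc : c ≠ '0') :
    pvRstripZeros (xs ++ [c]) = xs ++ [c] := by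
  unfold pvRstripZeros
  rw [List.reverse_append]
  simp [hc]

lemma digitChar_ne_zero (d : Nat) (h1 : d < 10) (h2 : d ≠ 0) : Nat.digitChar d ≠ '0' := by
  interval_cases d <;> simp_all <;> decide

lemma rstrip_toDigits (s : Nat) (hs : 0 < s) (h10 : s % 10 ≠ 0) :
    pvRstripZeros (Nat.toDigits 10 s) = Nat.toDigits 10 s := by
  by_cases hlt : s < 10
  · rw [Nat.toDigits_of_lt_base hlt]
    exact rstrip_last_ne [] _ (digitChar_ne_zero s hlt (by omega))
  · rw [Nat.toDigits_of_base_le (by norm_num) (by omega)]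
    exact rstrip_last_ne _ _ (digitChar_ne_zero _ (Nat.mod_lt _ (by norm_num)) h10)

lemma toDigits_mul_pow (s : Nat) (hs : 0 < s) (k : Nat) :
    Nat.toDigits 10 (s * 10 ^ k) = Nat.toDigits 10 s ++ List.replicate k '0' := by
  induction k with
  | zero => simp
  | succ k ihk =>
    have hp1 : 0 < s * 10 ^ k := by positivity
    have hbig : (10 : Nat) ≤ s * 10 ^ k * 10 := by omega
    have : s * 10 ^ (k + 1) = s * 10 ^ k * 10 := by ring
    rw [this, Nat.toDigits_of_base_le (by norm_num) hbig,
        Nat.mul_div_cancel _ (by norm_num), Nat.mul_mod_left, ihk, List.append_assoc]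
    simp [List.replicate_succ', show Nat.digitChar 0 = '0' from rfl]

lemma z_eq (s k : Nat) (hs : 0 < s) (h10 : s % 10 ≠ 0) :
    (Nat.toDigits 10 (s * 10 ^ k)).length -
      (pvRstripZeros (Nat.toDigits 10 (s * 10 ^ k))).length = k := by
  rw [toDigits_mul_pow s hs k, rstrip_append_replicate, rstrip_toDigits s hs h10]
  simp

-- ===== VERDICT (by name: the statement is the Claim_ definition above) =====
theorem A370255_spec : Claim_equal_A370255 := by
  intro n _ hpre
  unfold Spec_A370255 A370255 A370255_alt
  by_cases h0 : n = 0
  · simp [h0]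
  · rw [if_neg h0, if_neg h0]
    obtain ⟨m, rfl⟩ : ∃ m : Nat, n = (m : Int) := ⟨n.toNat, (Int.toNat_of_nonneg hpre).symm⟩
    have hm : 0 < m := by
      rcases Nat.eq_zero_or_pos m with h | h
      · exact absurd (by simp [h]) h0
      · exact h
    obtain ⟨k, hk, hne, hp⟩ := stripNat_spec m hm
    have hA : pvLoopA ((m : Int).natAbs + 1) (m : Int) = ((stripNat m : Nat) : Int) := by
      rw [Int.natAbs_natCast]
      exact loopA_eq m (m + 1) hm (by omega)
    have hchars : PySem.Int.toChars (m : Int) = Nat.toDigits 10 m := by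
      unfold PySem.Int.toChars
      rw [if_neg (by simp), Int.toNat_natCast]
    have hz : (PySem.Int.toChars (m : Int)).length -
        (pvRstripZeros (PySem.Int.toChars (m : Int))).length = k := by
      rw [hchars, hk]
      exact z_eq (stripNat m) k hp hne
    have hdivpow : PySem.Int.floordiv (m : Int) (10 ^ k) = ((stripNat m : Nat) : Int) := by
      have hcast : ((10 : Int)) ^ k = (((10 ^ k : Nat) : Int)) := by push_cast; ring
      have hq : m / 10 ^ k = stripNat m := by
        conv_lhs => rw [hk]
        exact Nat.mul_div_cancel _ (by positivity)
      rw [hcast, PySem.Int.floordiv_natCast, hq]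
    rw [hA]
    show _ = (PySem.Int.floordiv (↑m) (10 ^ ((PySem.Int.toChars (m : Int)).length -
        (pvRstripZeros (PySem.Int.toChars (m : Int))).length))) ^ (10 * (m : Int)).toNat
    rw [hz, hdivpow]
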